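-- pv_equiv track=rewrite | github.com/glengunawan/Ujian_UraiRajutKata | 1.py | rajut
-- ===== SOURCE A (Python) =====
-- def rajut(kata_uraian):
--     str_tampung = ''
--     panjangKata = len(kata_uraian)
--     angkaTotal = 0
--     pengulangan = 0
--     penambah = 1
--     while angkaTotal <= len(kata_uraian):
--         if angkaTotal != len(kata_uraian):
--             pengulangan += 1
--             angkaTotal = angkaTotal + penambah
--             penambah += 1
--         else:
--             angkaTotal = angkaTotal + penambah
--
--     for i in range(panjangKata-1, panjangKata-pengulangan-1, -1):
--         str_tampung = kata_uraian[i] + str_tampung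
--     return str_tampung
-- ===== SOURCE B (Python) =====
-- def _isqrt(m):
--     # integer square root by Newton's iteration (no imports allowed here)
--     if m < 2:
--         return m
--     x = m
--     y = (x + m // x) // 2
--     while y < x:
--         x = y
--         y = (x + m // x) // 2
--     return x
--
-- def rajut(kata_uraian):
--     n = len(kata_uraian)
--     # k = smallest integer with k*(k+1)//2 >= n, via the inverse triangular formula
--     s = _isqrt(8 * n + 1)
--     k = (s - 1) // 2
--     if k * (k + 1) // 2 < n:
--         k += 1
--     return kata_uraian[n - k:]
-- ===== Notes on version B (the rewrite author's own statement) =====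
-- stated objective: alternative
-- what changed: A finds k (the number of trailing characters kept, the smallest k with k*(k+1)/2 >= len) by an accumulating while-loop and then builds the result by prepending characters one at a time in a downward-index loop; B computes k in closed form by inverting the triangular-number formula with a Newton integer square root and returns the slice kata_uraian[n-k:] directly.
import Mathlib
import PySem

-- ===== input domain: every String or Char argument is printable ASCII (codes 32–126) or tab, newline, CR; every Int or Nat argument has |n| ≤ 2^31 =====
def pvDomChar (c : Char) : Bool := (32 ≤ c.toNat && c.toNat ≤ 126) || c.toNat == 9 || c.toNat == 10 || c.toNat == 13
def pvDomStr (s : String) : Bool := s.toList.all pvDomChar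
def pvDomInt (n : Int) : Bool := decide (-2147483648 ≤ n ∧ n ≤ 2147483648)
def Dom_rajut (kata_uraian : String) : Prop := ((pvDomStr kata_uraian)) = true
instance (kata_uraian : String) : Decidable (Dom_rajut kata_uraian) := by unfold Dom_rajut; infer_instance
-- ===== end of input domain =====

-- B replaces A's accumulating while-loop for k (the smallest k with k*(k+1)/2 ≥ len) by a
-- closed-form inverse-triangular formula via Newton integer square root, and returns the
-- slice kata_uraian[n-k:] directly instead of A's character-by-character prepend loop.

-- ===== PORT A =====
-- A's while-loop, state (angkaTotal, pengulangan, penambah); penambah ≥ 1 in every call,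
-- recorded as a hypothesis so the recursion terminates.
def rajutWhile (n angkaTotal pengulangan penambah : Nat) (hp : 1 ≤ penambah) : Nat × Nat :=
  if angkaTotal ≤ n then
    if angkaTotal ≠ n then
      rajutWhile n (angkaTotal + penambah) (pengulangan + 1) (penambah + 1) (by omega)
    else
      rajutWhile n (angkaTotal + penambah) pengulangan penambah hp
  else (angkaTotal, pengulangan)
termination_by n + 1 - angkaTotal
decreasing_by all_goals omega

-- kata_uraian[i] in the for-loop: i is always in range (n-pengulangan ≤ i ≤ n-1), so pyGetD is
-- exact there (Python never raises in A).
def rajut (kata_uraian : String) : String :=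
  let cs := kata_uraian.toList
  let panjangKata : Int := cs.length
  let pengulangan : Nat := (rajutWhile cs.length 0 0 1 (by omega)).2
  let str_tampung : List Char :=
    (PySem.List.pyRange (panjangKata - 1) (panjangKata - pengulangan - 1) (-1)).foldl
      (fun acc i => PySem.List.pyGetD cs i ' ' :: acc) []
  String.ofList str_tampung

-- ===== PORT B =====
-- Newton integer square root, transliterating _isqrt from Source B.
def isqrtGo (m x : Nat) : Nat :=
  let y := (x + m / x) / 2
  if y < x then isqrtGo m y else x
termination_by x

def isqrtNewton (m : Nat) : Nat :=
  if m < 2 then m else isqrtGo m m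

def rajut_alt (kata_uraian : String) : String :=
  let cs := kata_uraian.toList
  let n : Nat := cs.length
  let s := isqrtNewton (8 * n + 1)
  let k0 := (s - 1) / 2
  let k := if k0 * (k0 + 1) / 2 < n then k0 + 1 else k0
  String.ofList (PySem.List.slice cs (some ((n : Int) - (k : Int))) none)

-- ===== PRECONDITION & SPEC =====
def Spec_rajut (kata_uraian : String) (out : String) : Prop := out = rajut_alt kata_uraian
instance (kata_uraian : String) (out : String) : Decidable (Spec_rajut kata_uraian out) := by unfold Spec_rajut; infer_instance

-- ===== CLAIM (what is proved, stated in full; the proofs are below) =====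
def Claim_equal_rajut : Prop := ∀ (kata_uraian : String), Dom_rajut kata_uraian → Spec_rajut kata_uraian (rajut kata_uraian)

-- ===== LEMMAS AND PROOFS =====

-- the triangular number k*(k+1)/2
def tri (k : Nat) : Nat := k * (k + 1) / 2

lemma tri_double (k : Nat) : 2 * tri k = k * (k + 1) := by
  unfold tri
  have : 2 ∣ k * (k + 1) := (Nat.even_mul_succ_self k).two_dvd
  omega

lemma tri_succ (k : Nat) : tri (k + 1) = tri k + (k + 1) := by
  have h1 := tri_double k; have h2 := tri_double (k + 1); nlinarith

lemma tri_mono {i j : Nat} (h : i ≤ j) : tri i ≤ tri j := by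
  have h1 := tri_double i; have h2 := tri_double j; nlinarith

lemma self_le_tri (k : Nat) : k ≤ tri k := by
  have := tri_double k; nlinarith

-- the value both programs compute: the smallest k with tri k ≥ n
def Kspec (n k : Nat) : Prop := n ≤ tri k ∧ (k = 0 ∨ tri (k - 1) < n)

lemma Kspec_unique {n k1 k2 : Nat} (h1 : Kspec n k1) (h2 : Kspec n k2) : k1 = k2 := by
  rcases h1 with ⟨ha1, hb1⟩; rcases h2 with ⟨ha2, hb2⟩
  by_contra hne
  rcases Nat.lt_or_ge k1 k2 with h | h
  · rcases hb2 with rfl | hb2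
    · omega
    · have := tri_mono (show k1 ≤ k2 - 1 by omega); omega
  · rcases hb1 with rfl | hb1
    · omega
    · have h' : k2 ≤ k1 - 1 := by omega
      have := tri_mono h'; omega

lemma Kspec_le {n k : Nat} (h : Kspec n k) : k ≤ n := by
  rcases h with ⟨_, rfl | hb⟩
  · omega
  · have := self_le_tri (k - 1); omega

-- ---- A's while-loop computes Kspec ----

lemma rajutWhile_gt (n a p t : Nat) (hp : 1 ≤ t) (h : n < a) :
    rajutWhile n a p t hp = (a, p) := by
  rw [rajutWhile]; rw [if_neg (by omega)]

lemma rajutWhile_spec (n : Nat) :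
    ∀ μ a p, μ = n + 1 - a → a = tri p → (p = 0 ∨ tri (p - 1) < n) → a ≤ n →
      Kspec n (rajutWhile n a p (p + 1) (by omega)).2 := by
  intro μ
  induction μ using Nat.strong_induction_on with
  | _ μ ih =>
    intro a p hμ h hmin ha
    rw [rajutWhile, if_pos ha]
    by_cases hne : a = n
    · rw [if_neg (by omega)]
      rw [rajutWhile_gt _ _ _ _ _ (by omega)]
      exact (show Kspec n p from ⟨by omega, hmin⟩)
    · rw [if_pos hne]
      have hstep : a + (p + 1) = tri (p + 1) := by rw [tri_succ]; omega
      by_cases ha2 : a + (p + 1) ≤ n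
      · exact ih (n + 1 - (a + (p + 1))) (by omega) (a + (p + 1)) (p + 1) rfl hstep
          (Or.inr (by simpa using by omega)) ha2
      · rw [rajutWhile_gt _ _ _ _ _ (by omega)]
        exact (show Kspec n (p + 1) from ⟨by omega, Or.inr (by simpa using by omega)⟩)

-- ---- B's closed form computes Kspec ----

lemma sqrt_le_newton_step (m x : Nat) (hx : 1 ≤ x) : Nat.sqrt m ≤ (x + m / x) / 2 := by
  have hs : Nat.sqrt m * Nat.sqrt m ≤ m := by
    have := Nat.sqrt_le' m; nlinarith
  have hdm : x * (m / x) + m % x = m := Nat.div_add_mod m x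
  have hmod : m % x < x := Nat.mod_lt _ (by omega)
  rw [Nat.le_div_iff_mul_le (by omega)]
  by_contra hcon
  set s := Nat.sqrt m with hsdef
  set q := m / x with hqdef
  have hnat : x + q + 1 ≤ 2 * s := by omega
  have hZ : ((x : Int) + q + 1 ≤ 2 * s) := by exact_mod_cast hnat
  have hs' : ((s : Int) * s ≤ m) := by exact_mod_cast hs
  have hdm' : ((x : Int) * q + (m % x : Nat) = m) := by exact_mod_cast hdm
  have hmod' : ((m % x : Nat) : Int) < x := by exact_mod_cast hmod
  have hx' : (1 : Int) ≤ x := by exact_mod_cast hx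
  nlinarith [sq_nonneg ((x : Int) - s),
    mul_le_mul_of_nonneg_left (show (q : Int) + 1 ≤ 2 * s - x by omega)
      (show (0 : Int) ≤ x by omega)]

lemma newton_exit_le_sqrt (m x : Nat) (_hx : 1 ≤ x) (h : ¬ (x + m / x) / 2 < x) :
    x ≤ Nat.sqrt m := by
  have h2 : x * 2 ≤ x + m / x := (Nat.le_div_iff_mul_le (by omega)).1 (Nat.not_lt.1 h)
  have hxq : x ≤ m / x := by omega
  have : x * x ≤ m := le_trans (Nat.mul_le_mul_left x hxq) (Nat.mul_div_le m x)
  exact Nat.le_sqrt.2 this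

lemma isqrtGo_spec (m : Nat) (hm : 2 ≤ m) :
    ∀ x, Nat.sqrt m ≤ x → isqrtGo m x = Nat.sqrt m := by
  have hs1 : 1 ≤ Nat.sqrt m := Nat.le_sqrt.2 (by omega)
  intro x
  induction x using Nat.strong_induction_on with
  | _ x ih =>
    intro hxs
    have hx1 : 1 ≤ x := le_trans hs1 hxs
    rw [isqrtGo]
    show (if (x + m / x) / 2 < x then isqrtGo m ((x + m / x) / 2) else x) = Nat.sqrt m
    by_cases h : (x + m / x) / 2 < x
    · rw [if_pos h]
      exact ih _ h (sqrt_le_newton_step m x hx1)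
    · rw [if_neg h]
      exact le_antisymm (newton_exit_le_sqrt m x hx1 h) hxs

lemma isqrtNewton_eq (m : Nat) : isqrtNewton m = Nat.sqrt m := by
  unfold isqrtNewton
  by_cases h : m < 2
  · rw [if_pos h]; interval_cases m <;> rfl
  · rw [if_neg h]
    exact isqrtGo_spec m (by omega) m (Nat.sqrt_le_self m)

lemma alt_k_spec (n : Nat) :
    Kspec n (if ((isqrtNewton (8 * n + 1) - 1) / 2) * (((isqrtNewton (8 * n + 1) - 1) / 2) + 1) / 2 < n
             then (isqrtNewton (8 * n + 1) - 1) / 2 + 1 else (isqrtNewton (8 * n + 1) - 1) / 2) := by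
  rw [isqrtNewton_eq]
  have hs1 : Nat.sqrt (8 * n + 1) * Nat.sqrt (8 * n + 1) ≤ 8 * n + 1 := by
    have := Nat.sqrt_le' (8 * n + 1); nlinarith
  have hs2 : 8 * n + 1 < (Nat.sqrt (8 * n + 1) + 1) * (Nat.sqrt (8 * n + 1) + 1) := by
    have := Nat.lt_succ_sqrt' (8 * n + 1); nlinarith
  have hs0 : 1 ≤ Nat.sqrt (8 * n + 1) := Nat.le_sqrt.2 (by omega)
  set s := Nat.sqrt (8 * n + 1) with hsdef
  set k0 := (s - 1) / 2 with hk0def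
  have hcase : s = 2 * k0 + 1 ∨ s = 2 * k0 + 2 := by omega
  have htri0 : k0 * (k0 + 1) / 2 = tri k0 := rfl
  have htd := tri_double k0
  have htd1 := tri_double (k0 + 1)
  rw [htri0]
  by_cases h : tri k0 < n
  · rw [if_pos h]
    refine ⟨?_, Or.inr (by simpa using h)⟩
    rcases hcase with hc | hc <;> nlinarith
  · rw [if_neg h]
    refine ⟨by omega, ?_⟩
    by_cases hk0 : k0 = 0
    · exact Or.inl hk0
    · refine Or.inr ?_
      have hts : tri (k0 - 1) + k0 = tri k0 := by
        have := tri_succ (k0 - 1)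
        rw [Nat.sub_add_cancel (by omega)] at this
        omega
      have hle : tri k0 ≤ n := by
        rcases hcase with hc | hc <;> nlinarith
      omega

-- ---- the strings agree ----

theorem rajut_spec : Claim_equal_rajut := by
  intro kata _
  unfold Spec_rajut rajut rajut_alt
  simp only
  set cs := kata.toList with hcs
  set n := cs.length with hn
  -- A's loop count and B's closed-form k are both the minimal k with tri k ≥ n, hence equal
  have hA : Kspec n (rajutWhile n 0 0 1 (by omega)).2 :=
    rajutWhile_spec n (n + 1) 0 0 (by omega) rfl (Or.inl rfl) (by omega)
  have hB := alt_k_spec n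
  set kB := (if ((isqrtNewton (8 * n + 1) - 1) / 2) * (((isqrtNewton (8 * n + 1) - 1) / 2) + 1) / 2 < n
             then (isqrtNewton (8 * n + 1) - 1) / 2 + 1 else (isqrtNewton (8 * n + 1) - 1) / 2) with hkB
  have hk : (rajutWhile n 0 0 1 (by omega)).2 = kB := Kspec_unique hA hB
  have hkn : kB ≤ n := Kspec_le hB
  rw [hk]
  congr 1
  have h0 : (0 : Int) ≤ (n : Int) - (kB : Int) := by
    have : (kB : Int) ≤ n := by exact_mod_cast hkn
    omega
  -- index arithmetic: range(n-1, n-kB-1, -1) reversed is range(n-kB, n)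
  have e1 : ((n : Int) - (kB : Int) - 1) + 1 = (n : Int) - (kB : Int) := by ring
  have e2 : ((n : Int) - 1) + 1 = (n : Int) := by ring
  rw [PySem.List.pyRange_neg_one_eq_reverse, e1, e2, List.foldl_reverse,
    ← List.map_eq_foldr]
  rw [show ((n : Int)) = ((cs.length : Int)) from by rw [hn]]
  rw [PySem.List.map_pyGetD_pyRange' cs ' ' h0]
  rw [PySem.List.slice_from cs h0]
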